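-- pv_equiv track=rewrite | github.com/stanko07/Algo_veres_labs | src/the_shortest_safe_route.py | transform_matrix
-- ===== SOURCE A (Python) =====
-- def transform_matrix(matrix):
--     rows = len(matrix)
--     columns = len(matrix[0])
--     new_matrix = [[matrix[x][y] for y in range(columns)] for x in range(rows)]
--     for x in range(rows):
--         for y in range(columns):
--             if matrix[x][y] == 0:
--                 for dir_x in [-1, 0, 1]:
--                     for dir_y in [-1, 0, 1]:
--                         new_x, new_y = x + dir_x, y + dir_y
--                         if 0 <= new_x < rows and 0 <= new_y < columns:
--                             new_matrix[new_x][new_y] = 0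
--     return new_matrix
-- ===== SOURCE B (Python) =====
-- def transform_matrix(matrix):
--     rows = len(matrix)
--     columns = len(matrix[0])
--     return [[0 if any(0 <= x + dx < rows and 0 <= y + dy < columns
--                       and matrix[x + dx][y + dy] == 0
--                       for dx in (-1, 0, 1) for dy in (-1, 0, 1))
--              else matrix[x][y]
--              for y in range(columns)]
--             for x in range(rows)]
-- ===== Notes on version B (the rewrite author's own statement) =====
-- stated objective: alternative
-- what changed: Replaced A's scatter (copy the matrix, then for every zero cell overwrite its whole 3x3 neighborhood in the copy) by a gather comprehension (build each output cell directly: 0 if any in-bounds 3x3 neighbor in the original matrix is 0, else the original value), removing the mutable copy entirely.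
import Mathlib
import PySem

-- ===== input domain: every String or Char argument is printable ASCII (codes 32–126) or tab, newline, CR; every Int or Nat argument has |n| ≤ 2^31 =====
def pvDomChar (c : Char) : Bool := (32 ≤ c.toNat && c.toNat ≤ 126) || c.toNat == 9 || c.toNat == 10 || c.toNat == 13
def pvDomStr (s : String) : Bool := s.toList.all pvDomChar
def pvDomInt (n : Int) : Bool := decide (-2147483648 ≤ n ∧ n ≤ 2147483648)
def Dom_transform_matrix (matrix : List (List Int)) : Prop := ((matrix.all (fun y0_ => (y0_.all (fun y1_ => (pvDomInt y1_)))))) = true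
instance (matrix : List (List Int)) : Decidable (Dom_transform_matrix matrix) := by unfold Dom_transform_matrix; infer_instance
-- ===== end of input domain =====

-- B replaces A's scatter loop (copy the matrix, overwrite each zero cell's 3x3 neighborhood)
-- by a gather comprehension (each output cell is 0 iff some in-bounds neighbor of it is 0 in the
-- original matrix); same asymptotic cost, no mutable copy.

-- ===== PORT A =====
-- matrix[x][y]: under Pre_ every read below has in-range non-negative indices, so getD 0 is exact
def pvCell (m : List (List Int)) (x y : Nat) : Int := (m.getD x []).getD y 0

-- new_matrix[nx][ny] = 0 (indices guaranteed in range by A's guard)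
def pvMset (nm : List (List Int)) (x y : Nat) : List (List Int) :=
  nm.modify x (fun row => row.set y 0)

def transform_matrix (matrix : List (List Int)) : List (List Int) :=
  let rows := matrix.length
  let columns := (matrix.getD 0 []).length
  let new_matrix := (List.range rows).map (fun x => (List.range columns).map (fun y => pvCell matrix x y))
  (List.range rows).foldl (fun nm x =>
    (List.range columns).foldl (fun nm y =>
      if pvCell matrix x y = 0 then
        ([-1, 0, 1] : List Int).foldl (fun nm dx =>
          ([-1, 0, 1] : List Int).foldl (fun nm dy =>
            if 0 ≤ (x : Int) + dx ∧ (x : Int) + dx < (rows : Int) ∧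
               0 ≤ (y : Int) + dy ∧ (y : Int) + dy < (columns : Int) then
              pvMset nm ((x : Int) + dx).toNat ((y : Int) + dy).toNat
            else nm) nm) nm
      else nm) nm) new_matrix

-- ===== PORT B =====
def pvNbrZero (matrix : List (List Int)) (rows columns x y : Nat) : Bool :=
  ([-1, 0, 1] : List Int).any fun dx =>
    ([-1, 0, 1] : List Int).any fun dy =>
      decide (0 ≤ (x : Int) + dx ∧ (x : Int) + dx < (rows : Int) ∧
              0 ≤ (y : Int) + dy ∧ (y : Int) + dy < (columns : Int) ∧
              pvCell matrix ((x : Int) + dx).toNat ((y : Int) + dy).toNat = 0)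

def transform_matrix_alt (matrix : List (List Int)) : List (List Int) :=
  let rows := matrix.length
  let columns := (matrix.getD 0 []).length
  (List.range rows).map fun x => (List.range columns).map fun y =>
    if pvNbrZero matrix rows columns x y then 0 else pvCell matrix x y

-- ===== PRECONDITION & SPEC =====
-- Pre_ excludes exactly the inputs on which A raises IndexError: the empty matrix
-- (len(matrix[0])) and ragged matrices with some row shorter than the first row.
def Pre_transform_matrix (matrix : List (List Int)) : Prop :=
  matrix ≠ [] ∧ ∀ row ∈ matrix, (matrix.getD 0 []).length ≤ row.length
instance (matrix : List (List Int)) : Decidable (Pre_transform_matrix matrix) := by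
  unfold Pre_transform_matrix; infer_instance

def pvWitness_transform_matrix : List (List Int) := [[1, 0, 2], [1, 1, 1]]

def Spec_transform_matrix (matrix : List (List Int)) (out : List (List Int)) : Prop := out = transform_matrix_alt matrix
instance (matrix : List (List Int)) (out : List (List Int)) : Decidable (Spec_transform_matrix matrix out) := by unfold Spec_transform_matrix; infer_instance

-- ===== CLAIM (what is proved, stated in full; the proofs are below) =====
def Claim_equal_transform_matrix : Prop := ∀ (matrix : List (List Int)), Dom_transform_matrix matrix → Pre_transform_matrix matrix → Spec_transform_matrix matrix (transform_matrix matrix)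

-- ===== LEMMAS AND PROOFS =====

-- proof-only definitions
def pvInit (matrix : List (List Int)) : List (List Int) :=
  (List.range matrix.length).map (fun x =>
    (List.range (matrix.getD 0 []).length).map (fun y => pvCell matrix x y))

def pvNbrs (R C x y : Nat) : List (Nat × Nat) :=
  ([-1, 0, 1] : List Int).flatMap fun dx =>
    ([-1, 0, 1] : List Int).flatMap fun dy =>
      if 0 ≤ (x : Int) + dx ∧ (x : Int) + dx < (R : Int) ∧
         0 ≤ (y : Int) + dy ∧ (y : Int) + dy < (C : Int) then
        [(((x : Int) + dx).toNat, ((y : Int) + dy).toNat)] else []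

def pvWrites (matrix : List (List Int)) : List (Nat × Nat) :=
  (List.range matrix.length).flatMap fun x =>
    (List.range (matrix.getD 0 []).length).flatMap fun y =>
      if pvCell matrix x y = 0 then pvNbrs matrix.length (matrix.getD 0 []).length x y else []

def pvShape (nm : List (List Int)) (R C : Nat) : Prop :=
  nm.length = R ∧ ∀ (i : Nat) (h : i < nm.length), nm[i].length = C

lemma foldl_ite_nil {α β : Type} (c : Prop) [Decidable c] (l : List α) (f : β → α → β) (b : β) :
    (if c then l else []).foldl f b = if c then l.foldl f b else b := by
  split <;> simp

lemma A_as_writes (matrix : List (List Int)) :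
    transform_matrix matrix =
      (pvWrites matrix).foldl (fun nm p => pvMset nm p.1 p.2) (pvInit matrix) := by
  unfold transform_matrix pvWrites pvNbrs pvInit
  simp only [List.foldl_flatMap, foldl_ite_nil, List.foldl_cons, List.foldl_nil]

lemma shape_mset {nm : List (List Int)} {R C x y : Nat} (h : pvShape nm R C) :
    pvShape (pvMset nm x y) R C := by
  obtain ⟨h1, h2⟩ := h
  refine ⟨by simp [pvMset, h1], ?_⟩
  intro i hi
  simp only [pvMset, List.length_modify] at hi
  simp [pvMset, List.getElem_modify]
  split <;> simp [h2 i hi]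

lemma cell_eq_getElem {m : List (List Int)} {i j : Nat} (hi : i < m.length)
    (hj : j < m[i].length) : pvCell m i j = m[i][j] := by
  simp [pvCell, List.getD_eq_getElem?_getD, List.getElem?_eq_getElem, hi, hj]

lemma cell_mset {nm : List (List Int)} {R C x y : Nat} (h : pvShape nm R C)
    (hx : x < R) (hy : y < C) (i j : Nat) :
    pvCell (pvMset nm x y) i j = if i = x ∧ j = y then 0 else pvCell nm i j := by
  obtain ⟨h1, h2⟩ := h
  simp only [pvCell, pvMset, List.getD_eq_getElem?_getD]
  by_cases hix : x = i
  · subst hix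
    have hxl : x < nm.length := by omega
    have hrow : nm[x].length = C := h2 x hxl
    rw [List.getElem?_modify_eq, List.getElem?_eq_getElem hxl]
    by_cases hjy : j = y
    · subst hjy
      simp [List.getElem?_set_self (by omega : j < nm[x].length)]
    · simp [List.getElem?_set_ne (fun h => hjy h.symm), hjy]
  · rw [List.getElem?_modify_ne _ _ hix]
    have : ¬ (i = x ∧ j = y) := fun h => hix h.1.symm
    simp [this]

lemma foldl_mset_char {R C : Nat} (ps : List (Nat × Nat)) :
    (∀ p ∈ ps, p.1 < R ∧ p.2 < C) →
    ∀ (acc : List (List Int)), pvShape acc R C →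
      pvShape (ps.foldl (fun nm p => pvMset nm p.1 p.2) acc) R C ∧
      ∀ i j, pvCell (ps.foldl (fun nm p => pvMset nm p.1 p.2) acc) i j =
        if (i, j) ∈ ps then 0 else pvCell acc i j := by
  induction ps with
  | nil => intro _ acc hacc; simpa using hacc
  | cons p ps ih =>
    intro hps acc hacc
    have hp := hps p (List.mem_cons_self ..)
    have hps' : ∀ q ∈ ps, q.1 < R ∧ q.2 < C := fun q hq => hps q (List.mem_cons_of_mem _ hq)
    have hacc' : pvShape (pvMset acc p.1 p.2) R C := shape_mset hacc
    obtain ⟨hsh, hch⟩ := ih hps' (pvMset acc p.1 p.2) hacc'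
    refine ⟨by simpa using hsh, ?_⟩
    intro i j
    simp only [List.foldl_cons]
    rw [hch i j, cell_mset hacc hp.1 hp.2]
    by_cases hmem : (i, j) ∈ ps
    · simp [hmem, List.mem_cons]
    · by_cases hpe : (i, j) = p
      · have : i = p.1 ∧ j = p.2 := by cases p; simpa [Prod.ext_iff] using hpe
        simp [hmem, this, List.mem_cons, hpe]
      · have : ¬ (i = p.1 ∧ j = p.2) := by
          intro h; exact hpe (by cases p; simp [Prod.ext_iff, h.1, h.2])
        simp [hmem, this, List.mem_cons, hpe]

lemma shape_init (matrix : List (List Int)) :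
    pvShape (pvInit matrix) matrix.length (matrix.getD 0 []).length := by
  constructor
  · simp [pvInit]
  · intro i hi; simp [pvInit]

lemma cell_map_grid (matrix : List (List Int)) (f : Nat → Nat → Int) {R C i j : Nat}
    (hi : i < R) (hj : j < C) :
    pvCell ((List.range R).map fun x => (List.range C).map fun y => f x y) i j = f i j := by
  have h1 : i < ((List.range R).map fun x => (List.range C).map fun y => f x y).length := by
    simpa using hi
  rw [cell_eq_getElem h1 (by simpa using hj)]
  simp

lemma mem_dirs_iff (d : Int) : d ∈ ([-1, 0, 1] : List Int) ↔ d = -1 ∨ d = 0 ∨ d = 1 := by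
  simp

-- common arithmetic characterization of "cell (a,b) is an in-grid zero adjacent to (i,j)"
def pvNear (matrix : List (List Int)) (R C i j : Nat) : Prop :=
  ∃ a b : Nat, a < R ∧ b < C ∧
    (a : Int) ≤ (i : Int) + 1 ∧ (i : Int) ≤ (a : Int) + 1 ∧
    (b : Int) ≤ (j : Int) + 1 ∧ (j : Int) ≤ (b : Int) + 1 ∧
    pvCell matrix a b = 0

lemma nbrZero_iff_near (matrix : List (List Int)) (R C i j : Nat) :
    pvNbrZero matrix R C i j = true ↔ pvNear matrix R C i j := by
  simp only [pvNbrZero, List.any_eq_true, decide_eq_true_eq]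
  constructor
  · rintro ⟨dx, hdx, dy, hdy, h1, h2, h3, h4, hg⟩
    rw [mem_dirs_iff] at hdx hdy
    exact ⟨((i : Int) + dx).toNat, ((j : Int) + dy).toNat, by omega, by omega,
      by omega, by omega, by omega, by omega, hg⟩
  · rintro ⟨a, b, ha, hb, n1, n2, n3, n4, hg⟩
    refine ⟨(a : Int) - i, ?_, (b : Int) - j, ?_, ?_, ?_, ?_, ?_, ?_⟩
    · rw [mem_dirs_iff]; omega
    · rw [mem_dirs_iff]; omega
    · omega
    · omega
    · omega
    · omega
    · have e1 : ((i : Int) + ((a : Int) - i)).toNat = a := by omega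
      have e2 : ((j : Int) + ((b : Int) - j)).toNat = b := by omega
      rw [e1, e2]; exact hg

lemma mem_nbrs_iff {R C x y i j : Nat} :
    (i, j) ∈ pvNbrs R C x y ↔
      ∃ dx ∈ ([-1, 0, 1] : List Int), ∃ dy ∈ ([-1, 0, 1] : List Int),
        (0 ≤ (x : Int) + dx ∧ (x : Int) + dx < (R : Int) ∧
         0 ≤ (y : Int) + dy ∧ (y : Int) + dy < (C : Int)) ∧
        (i : Int) = (x : Int) + dx ∧ (j : Int) = (y : Int) + dy := by
  simp only [pvNbrs, List.mem_flatMap]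
  constructor
  · rintro ⟨dx, hdx, dy, hdy, hmem⟩
    split at hmem
    · rename_i hc
      simp only [List.mem_singleton, Prod.mk.injEq] at hmem
      exact ⟨dx, hdx, dy, hdy, hc, by omega, by omega⟩
    · simp at hmem
  · rintro ⟨dx, hdx, dy, hdy, hc, e1, e2⟩
    refine ⟨dx, hdx, dy, hdy, ?_⟩
    simp [hc, Prod.ext_iff]
    omega

lemma mem_writes_iff {matrix : List (List Int)} {i j : Nat}
    (hi : i < matrix.length) (hj : j < (matrix.getD 0 []).length) :
    (i, j) ∈ pvWrites matrix ↔
      pvNear matrix matrix.length (matrix.getD 0 []).length i j := by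
  simp only [pvWrites, List.mem_flatMap, List.mem_range]
  constructor
  · rintro ⟨x, hx, y, hy, hmem⟩
    split at hmem
    · rename_i hz
      rw [mem_nbrs_iff] at hmem
      obtain ⟨dx, hdx, dy, hdy, hc, e1, e2⟩ := hmem
      rw [mem_dirs_iff] at hdx hdy
      exact ⟨x, y, hx, hy, by omega, by omega, by omega, by omega, hz⟩
    · simp at hmem
  · rintro ⟨a, b, ha, hb, n1, n2, n3, n4, hg⟩
    refine ⟨a, ha, b, hb, ?_⟩
    rw [if_pos hg, mem_nbrs_iff]
    refine ⟨(i : Int) - a, ?_, (j : Int) - b, ?_, ⟨?_, ?_, ?_, ?_⟩, ?_, ?_⟩ <;>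
      first
      | (rw [mem_dirs_iff]; omega)
      | omega

lemma writes_in_range {matrix : List (List Int)} :
    ∀ p ∈ pvWrites matrix, p.1 < matrix.length ∧ p.2 < (matrix.getD 0 []).length := by
  rintro ⟨i, j⟩ hp
  simp only [pvWrites, List.mem_flatMap, List.mem_range] at hp
  obtain ⟨x, hx, y, hy, hmem⟩ := hp
  split at hmem
  · rw [mem_nbrs_iff] at hmem
    obtain ⟨dx, hdx, dy, hdy, hc, e1, e2⟩ := hmem
    rw [mem_dirs_iff] at hdx hdy
    constructor <;> omega
  · simp at hmem

lemma matrix_ext {m1 m2 : List (List Int)} {R C : Nat} (h1 : pvShape m1 R C)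
    (h2 : pvShape m2 R C)
    (h : ∀ i j, i < R → j < C → pvCell m1 i j = pvCell m2 i j) : m1 = m2 := by
  obtain ⟨l1, g1⟩ := h1
  obtain ⟨l2, g2⟩ := h2
  apply List.ext_getElem (by omega)
  intro i hi1 hi2
  apply List.ext_getElem (by rw [g1 i hi1, g2 i hi2])
  intro j hj1 hj2
  have hcell := h i j (by omega) (by rw [← g1 i hi1]; exact hj1)
  rwa [cell_eq_getElem hi1 hj1, cell_eq_getElem hi2 hj2] at hcell

-- ===== VERDICT (by name: the statement is the Claim_ definition above) =====
theorem transform_matrix_spec : Claim_equal_transform_matrix := by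
  intro matrix _ _
  unfold Spec_transform_matrix
  rw [A_as_writes]
  obtain ⟨hshA, hcellA⟩ :=
    foldl_mset_char (pvWrites matrix) writes_in_range (pvInit matrix) (shape_init matrix)
  have hshB : pvShape (transform_matrix_alt matrix) matrix.length (matrix.getD 0 []).length := by
    constructor
    · simp [transform_matrix_alt]
    · intro i hi; simp [transform_matrix_alt]
  refine matrix_ext hshA hshB ?_
  intro i j hi hj
  rw [hcellA i j]
  have hB : pvCell (transform_matrix_alt matrix) i j =
      if pvNbrZero matrix matrix.length (matrix.getD 0 []).length i j then 0
      else pvCell matrix i j := by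
    unfold transform_matrix_alt
    exact cell_map_grid matrix _ hi hj
  rw [hB]
  have hInit : pvCell (pvInit matrix) i j = pvCell matrix i j := by
    unfold pvInit
    exact cell_map_grid matrix _ hi hj
  rw [hInit]
  by_cases hmem : (i, j) ∈ pvWrites matrix
  · have := (mem_writes_iff hi hj).mp hmem
    rw [if_pos hmem, if_pos ((nbrZero_iff_near matrix _ _ i j).mpr this)]
  · have : ¬ pvNbrZero matrix matrix.length (matrix.getD 0 []).length i j = true := fun h =>
      hmem ((mem_writes_iff hi hj).mpr ((nbrZero_iff_near matrix _ _ i j).mp h))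
    rw [if_neg hmem, if_neg this]
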